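-- pv_equiv track=rewrite | github.com/franciszver/PennyGadget | src/api/handlers/progress.py | _get_related_subjects
-- ===== SOURCE A (Python) =====
-- from typing import Optional, List
--
-- def _get_related_subjects(subject_name: str, goal_type: Optional[str] = None) -> List[str]:
--     """Get related subject suggestions based on completed goal"""
--     subject_lower = subject_name.lower()
--
--     # SAT-specific suggestions (when goal_type is SAT and goal is completed)
--     if goal_type and goal_type.upper() == "SAT":
--         if 'math' in subject_lower:
--             return ["College Essays", "Study Skills", "AP Prep"]
--         elif 'english' in subject_lower or 'essay' in subject_lower:
--             return ["SAT Math", "AP English Literature", "AP Language"]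
--         else:
--             # General SAT completion
--             return ["College Essays", "Study Skills", "AP Prep"]
--
--     # Subject-based suggestions
--     if any(kw in subject_lower for kw in ['sat', 'test prep']):
--         if 'math' in subject_lower:
--             return ["College Essays", "Study Skills", "AP Prep"]
--         elif 'english' in subject_lower or 'essay' in subject_lower:
--             return ["SAT Math", "AP English Literature", "AP Language"]
--         else:
--             return ["College Essays", "Study Skills", "AP Prep"]
--
--     elif 'algebra' in subject_lower:
--         return ["Geometry", "Pre-Calculus", "AP Calculus"]
--     elif 'geometry' in subject_lower:
--         return ["Algebra 2", "Trigonometry", "AP Calculus"]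
--     elif 'calculus' in subject_lower:
--         return ["AP Statistics", "Physics", "Advanced Math"]
--
--     elif 'chemistry' in subject_lower:
--         # Enhanced Chemistry suggestions
--         return ["Physics", "Biology", "AP Chemistry", "STEM Prep"]
--     elif 'physics' in subject_lower:
--         return ["Chemistry", "AP Physics", "Calculus"]
--     elif 'biology' in subject_lower:
--         return ["Chemistry", "AP Biology", "Environmental Science"]
--
--     elif 'ap' in subject_lower:
--         if 'math' in subject_lower:
--             return ["AP Statistics", "AP Physics", "Calculus BC"]
--         elif 'science' in subject_lower or 'chemistry' in subject_lower or 'physics' in subject_lower: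
--             return ["AP Math", "AP Biology", "AP Environmental Science"]
--         else:
--             return ["AP Math", "AP Science", "Test Prep"]
--
--     # Default suggestions
--     return ["Related Subject 1", "Related Subject 2"]
-- ===== SOURCE B (Python) =====
-- from typing import Optional, List
--
-- _PRIORITY = ['sat', 'algebra', 'geometry', 'calculus', 'chemistry', 'physics', 'biology', 'ap']
--
-- def _sat_suggestions(s: str) -> List[str]:
--     if 'math' in s:
--         return ["College Essays", "Study Skills", "AP Prep"]
--     if 'english' in s or 'essay' in s:
--         return ["SAT Math", "AP English Literature", "AP Language"]
--     return ["College Essays", "Study Skills", "AP Prep"]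
--
-- def _ap_suggestions(s: str) -> List[str]:
--     if 'math' in s:
--         return ["AP Statistics", "AP Physics", "Calculus BC"]
--     if 'science' in s or 'chemistry' in s or 'physics' in s:
--         return ["AP Math", "AP Biology", "AP Environmental Science"]
--     return ["AP Math", "AP Science", "Test Prep"]
--
-- _HANDLERS = {
--     'sat': _sat_suggestions,
--     'algebra': lambda s: ["Geometry", "Pre-Calculus", "AP Calculus"],
--     'geometry': lambda s: ["Algebra 2", "Trigonometry", "AP Calculus"],
--     'calculus': lambda s: ["AP Statistics", "Physics", "Advanced Math"],
--     'chemistry': lambda s: ["Physics", "Biology", "AP Chemistry", "STEM Prep"],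
--     'physics': lambda s: ["Chemistry", "AP Physics", "Calculus"],
--     'biology': lambda s: ["Chemistry", "AP Biology", "Environmental Science"],
--     'ap': _ap_suggestions,
-- }
--
-- def _get_related_subjects(subject_name: str, goal_type: Optional[str] = None) -> List[str]:
--     s = subject_name.lower()
--     # Stage 1: collect the full set of matching tags (no short-circuiting).
--     hits = [kw for kw in _PRIORITY if kw in s]
--     # The SAT tag is also triggered by the goal type or 'test prep'.
--     if ('test prep' in s or (goal_type and goal_type.upper() == "SAT")) and 'sat' not in hits:
--         hits.append('sat')
--     if not hits:
--         return ["Related Subject 1", "Related Subject 2"]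
--     # Stage 2: pick the highest-priority tag and dispatch through the handler table.
--     tag = min(hits, key=_PRIORITY.index)
--     return _HANDLERS[tag](s)
-- ===== Notes on version B (the rewrite author's own statement) =====
-- stated objective: alternative
-- what changed: Instead of A's short-circuiting if/elif cascade, B first collects the complete list of matching keyword tags (plus an SAT tag from the goal type or 'test prep'), then selects the highest-priority tag via min(key=priority index) and dispatches through a dict of handler functions.
import Mathlib
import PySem

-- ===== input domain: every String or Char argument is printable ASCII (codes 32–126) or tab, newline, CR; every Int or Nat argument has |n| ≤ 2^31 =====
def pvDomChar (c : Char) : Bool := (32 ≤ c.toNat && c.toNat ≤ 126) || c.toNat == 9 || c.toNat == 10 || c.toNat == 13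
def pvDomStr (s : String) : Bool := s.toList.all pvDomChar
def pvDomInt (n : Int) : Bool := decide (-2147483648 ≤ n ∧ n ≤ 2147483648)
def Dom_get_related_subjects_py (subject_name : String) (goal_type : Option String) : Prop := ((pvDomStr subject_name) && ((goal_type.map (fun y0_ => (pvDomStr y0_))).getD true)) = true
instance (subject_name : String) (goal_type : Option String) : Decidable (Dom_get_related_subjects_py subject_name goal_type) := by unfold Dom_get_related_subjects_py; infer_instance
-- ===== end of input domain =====

-- B replaces A's short-circuiting if/elif cascade by a two-stage algorithm: first collect the
-- full set of matching keyword tags, then pick the highest-priority tag (min by index) and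
-- dispatch through a handler table (objective: alternative decomposition, same cost).

-- ===== PORT A =====
def get_related_subjects_py (subject_name : String) (goal_type : Option String) : List String :=
  let subject_lower := PySem.Str.lower subject_name
  -- 'goal_type and goal_type.upper() == "SAT"' (None and "" are falsy)
  if (match goal_type with
      | some g => decide (g ≠ "") && (PySem.Str.upper g == "SAT")
      | none => false) then
    if PySem.Str.isIn "math" subject_lower then
      ["College Essays", "Study Skills", "AP Prep"]
    else if PySem.Str.isIn "english" subject_lower || PySem.Str.isIn "essay" subject_lower then
      ["SAT Math", "AP English Literature", "AP Language"]
    else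
      ["College Essays", "Study Skills", "AP Prep"]
  else if ["sat", "test prep"].any (fun kw => PySem.Str.isIn kw subject_lower) then
    if PySem.Str.isIn "math" subject_lower then
      ["College Essays", "Study Skills", "AP Prep"]
    else if PySem.Str.isIn "english" subject_lower || PySem.Str.isIn "essay" subject_lower then
      ["SAT Math", "AP English Literature", "AP Language"]
    else
      ["College Essays", "Study Skills", "AP Prep"]
  else if PySem.Str.isIn "algebra" subject_lower then
    ["Geometry", "Pre-Calculus", "AP Calculus"]
  else if PySem.Str.isIn "geometry" subject_lower then
    ["Algebra 2", "Trigonometry", "AP Calculus"]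
  else if PySem.Str.isIn "calculus" subject_lower then
    ["AP Statistics", "Physics", "Advanced Math"]
  else if PySem.Str.isIn "chemistry" subject_lower then
    ["Physics", "Biology", "AP Chemistry", "STEM Prep"]
  else if PySem.Str.isIn "physics" subject_lower then
    ["Chemistry", "AP Physics", "Calculus"]
  else if PySem.Str.isIn "biology" subject_lower then
    ["Chemistry", "AP Biology", "Environmental Science"]
  else if PySem.Str.isIn "ap" subject_lower then
    if PySem.Str.isIn "math" subject_lower then
      ["AP Statistics", "AP Physics", "Calculus BC"]
    else if PySem.Str.isIn "science" subject_lower || PySem.Str.isIn "chemistry" subject_lower || PySem.Str.isIn "physics" subject_lower then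
      ["AP Math", "AP Biology", "AP Environmental Science"]
    else
      ["AP Math", "AP Science", "Test Prep"]
  else
    ["Related Subject 1", "Related Subject 2"]

-- ===== PORT B =====
def pvPriority : List String := ["sat", "algebra", "geometry", "calculus", "chemistry", "physics", "biology", "ap"]

def pvSatSuggestions (s : String) : List String :=
  if PySem.Str.isIn "math" s then ["College Essays", "Study Skills", "AP Prep"]
  else if PySem.Str.isIn "english" s || PySem.Str.isIn "essay" s then
    ["SAT Math", "AP English Literature", "AP Language"]
  else ["College Essays", "Study Skills", "AP Prep"]

def pvApSuggestions (s : String) : List String :=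
  if PySem.Str.isIn "math" s then ["AP Statistics", "AP Physics", "Calculus BC"]
  else if PySem.Str.isIn "science" s || PySem.Str.isIn "chemistry" s || PySem.Str.isIn "physics" s then
    ["AP Math", "AP Biology", "AP Environmental Science"]
  else ["AP Math", "AP Science", "Test Prep"]

-- Source B's _HANDLERS dict of functions, as a dispatch on the tag (tag ∈ pvPriority, so the
-- final arm — Python's KeyError — is unreachable)
def pvHandler (tag : String) (s : String) : List String :=
  if tag == "sat" then pvSatSuggestions s
  else if tag == "algebra" then ["Geometry", "Pre-Calculus", "AP Calculus"]
  else if tag == "geometry" then ["Algebra 2", "Trigonometry", "AP Calculus"]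
  else if tag == "calculus" then ["AP Statistics", "Physics", "Advanced Math"]
  else if tag == "chemistry" then ["Physics", "Biology", "AP Chemistry", "STEM Prep"]
  else if tag == "physics" then ["Chemistry", "AP Physics", "Calculus"]
  else if tag == "biology" then ["Chemistry", "AP Biology", "Environmental Science"]
  else if tag == "ap" then pvApSuggestions s
  else []

def get_related_subjects_py_alt (subject_name : String) (goal_type : Option String) : List String :=
  let s := PySem.Str.lower subject_name
  -- Stage 1: full match set (no short-circuiting)
  let hits := pvPriority.filter (fun kw => PySem.Str.isIn kw s)
  let hits :=
    if (PySem.Str.isIn "test prep" s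
        || (match goal_type with
            | some g => decide (g ≠ "") && (PySem.Str.upper g == "SAT")
            | none => false))
       && !(hits.contains "sat") then hits ++ ["sat"] else hits
  if hits.isEmpty then ["Related Subject 1", "Related Subject 2"]
  else
    -- Stage 2: min-by-priority-index, then handler-table dispatch
    -- (_PRIORITY.index never raises here since hits ⊆ pvPriority, so getD 0 is unreachable)
    match PySem.List.min? hits (fun kw => (PySem.List.index? pvPriority kw).getD 0) with
    | some tag => pvHandler tag s
    | none => []  -- unreachable: hits is nonempty

-- ===== PRECONDITION & SPEC =====
def Spec_get_related_subjects_py (subject_name : String) (goal_type : Option String) (out : List String) : Prop := out = get_related_subjects_py_alt subject_name goal_type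
instance (subject_name : String) (goal_type : Option String) (out : List String) : Decidable (Spec_get_related_subjects_py subject_name goal_type out) := by unfold Spec_get_related_subjects_py; infer_instance

-- ===== CLAIM =====
def Claim_equal_get_related_subjects_py : Prop := ∀ (subject_name : String) (goal_type : Option String), Dom_get_related_subjects_py subject_name goal_type → Spec_get_related_subjects_py subject_name goal_type (get_related_subjects_py subject_name goal_type)

-- ===== LEMMAS AND PROOFS =====

theorem pv_filt (p : String → Bool) (x : String) (l : List String) :
    List.filter p (x :: l) = (if p x = true then [x] else []) ++ List.filter p l := by
  cases h : p x <;> simp [h]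

-- List.filter over the literal priority list, in if-append form (so the membership
-- atoms become unifiable boolean positions)
theorem pv_filter (p : String → Bool) :
    List.filter p pvPriority =
      (if p "sat" then ["sat"] else []) ++ (if p "algebra" then ["algebra"] else []) ++
      (if p "geometry" then ["geometry"] else []) ++ (if p "calculus" then ["calculus"] else []) ++
      (if p "chemistry" then ["chemistry"] else []) ++ (if p "physics" then ["physics"] else []) ++
      (if p "biology" then ["biology"] else []) ++ (if p "ap" then ["ap"] else []) := by
  simp only [pvPriority, pv_filt, List.filter_nil, List.append_nil, List.append_assoc]

-- the two decision procedures agree for every valuation of the ten selection atoms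
-- (the SAT/AP sub-dispatches stay abstract as functions of s on both sides)
set_option maxHeartbeats 16000000 in
theorem pv_key (s : String) (b0 b1 b2 b3 b4 b5 b6 b7 b8 b9 : Bool) :
    (if b0 = true then pvSatSuggestions s
     else if (b1 || (b9 || false)) = true then pvSatSuggestions s
     else if b2 = true then ["Geometry", "Pre-Calculus", "AP Calculus"]
     else if b3 = true then ["Algebra 2", "Trigonometry", "AP Calculus"]
     else if b4 = true then ["AP Statistics", "Physics", "Advanced Math"]
     else if b5 = true then ["Physics", "Biology", "AP Chemistry", "STEM Prep"]
     else if b6 = true then ["Chemistry", "AP Physics", "Calculus"]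
     else if b7 = true then ["Chemistry", "AP Biology", "Environmental Science"]
     else if b8 = true then pvApSuggestions s
     else ["Related Subject 1", "Related Subject 2"]) =
    (let H : List String :=
       (if b1 then ["sat"] else []) ++ (if b2 then ["algebra"] else []) ++
       (if b3 then ["geometry"] else []) ++ (if b4 then ["calculus"] else []) ++
       (if b5 then ["chemistry"] else []) ++ (if b6 then ["physics"] else []) ++
       (if b7 then ["biology"] else []) ++ (if b8 then ["ap"] else [])
     let hits : List String := if ((b9 || b0) && !(H.contains "sat")) = true then H ++ ["sat"] else H
     if hits.isEmpty = true then ["Related Subject 1", "Related Subject 2"]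
     else
       match PySem.List.min? hits (fun kw => (PySem.List.index? pvPriority kw).getD 0) with
       | some tag => pvHandler tag s
       | none => []) := by
  cases b0 <;> cases b1 <;> cases b2 <;> cases b3 <;> cases b4 <;> cases b5 <;>
    cases b6 <;> cases b7 <;> cases b8 <;> cases b9 <;> rfl

-- ===== VERDICT =====
set_option maxHeartbeats 4000000 in
theorem get_related_subjects_py_spec : Claim_equal_get_related_subjects_py := by
  intro subject_name goal_type _
  cases goal_type with
  | none =>
    simp only [Spec_get_related_subjects_py, get_related_subjects_py, get_related_subjects_py_alt,
      pv_filter, List.any_cons, List.any_nil]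
    exact pv_key (PySem.Str.lower subject_name) _ _ _ _ _ _ _ _ _ _
  | some g =>
    simp only [Spec_get_related_subjects_py, get_related_subjects_py, get_related_subjects_py_alt,
      pv_filter, List.any_cons, List.any_nil]
    exact pv_key (PySem.Str.lower subject_name) _ _ _ _ _ _ _ _ _ _
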